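-- pv_equiv track=rewrite | github.com/dakid314/T3_T4 | src/blast/change_name.py | replace_non_standard
-- ===== SOURCE A (Python) =====
-- def replace_non_standard(sequence):
--     standard_amino_acids = set("ACDEFGHIKLMNPQRSTVWY")
--     replaced_sequence = ""
--     for letter in sequence:
--         if letter not in standard_amino_acids:
--             replaced_sequence += "A"
--         else:
--             replaced_sequence += letter
--     return replaced_sequence
-- ===== SOURCE B (Python) =====
-- def replace_non_standard(sequence):
--     standard_amino_acids = set("ACDEFGHIKLMNPQRSTVWY")
--     table = {ord(c): ord("A") for c in set(sequence) if c not in standard_amino_acids}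
--     return sequence.translate(table)
-- ===== Notes on version B (the rewrite author's own statement) =====
-- stated objective: idiomatic
-- what changed: Replaces the explicit character-by-character accumulation loop with building a translation table over the distinct non-standard characters present and one str.translate pass.
import Mathlib
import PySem

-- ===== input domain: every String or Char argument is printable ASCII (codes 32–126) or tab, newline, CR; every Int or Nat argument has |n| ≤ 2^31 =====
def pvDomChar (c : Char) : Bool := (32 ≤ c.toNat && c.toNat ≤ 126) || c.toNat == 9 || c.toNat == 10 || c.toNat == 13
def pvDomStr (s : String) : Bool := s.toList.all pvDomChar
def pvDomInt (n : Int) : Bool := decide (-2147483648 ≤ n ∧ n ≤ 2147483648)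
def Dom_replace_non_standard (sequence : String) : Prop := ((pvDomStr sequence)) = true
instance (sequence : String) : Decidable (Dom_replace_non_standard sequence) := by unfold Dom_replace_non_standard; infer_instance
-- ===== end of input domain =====

-- B builds a translation table from the distinct non-standard characters present and
-- translates in one table-driven pass, instead of A's character-by-character accumulation loop.


-- ===== PORT A =====
def replace_non_standard (sequence : String) : String :=
  let standard_amino_acids : PySem.Set Char := PySem.Set.ofList "ACDEFGHIKLMNPQRSTVWY".toList
  String.mk (sequence.toList.foldl
    (fun acc letter =>
      if !(standard_amino_acids.contains letter) then acc ++ ['A'] else acc ++ [letter]) [])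

-- ===== PORT B =====
-- translate's table is keyed by ord(c) in Python; Char keys are an exact model on this domain.
def replace_non_standard_alt (sequence : String) : String :=
  let standard_amino_acids : PySem.Set Char := PySem.Set.ofList "ACDEFGHIKLMNPQRSTVWY".toList
  let table : PySem.Dict Char Char :=
    ((PySem.Set.ofList sequence.toList).filter
      (fun c => !(standard_amino_acids.contains c))).foldl
      (fun d c => d.insert c 'A') PySem.Dict.empty
  String.mk (sequence.toList.map (fun c => (table.get? c).getD c))

-- ===== PRECONDITION & SPEC =====
def Spec_replace_non_standard (sequence : String) (out : String) : Prop := out = replace_non_standard_alt sequence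
instance (sequence : String) (out : String) : Decidable (Spec_replace_non_standard sequence out) := by unfold Spec_replace_non_standard; infer_instance

-- ===== CLAIM (what is proved, stated in full; the proofs are below) =====
def Claim_equal_replace_non_standard : Prop := ∀ (sequence : String), Dom_replace_non_standard sequence → Spec_replace_non_standard sequence (replace_non_standard sequence)

-- ===== LEMMAS AND PROOFS =====

-- A's loop is the pointwise choice mapped over the characters
theorem pvFoldA (p : Char → Bool) (l : List Char) (acc : List Char) :
    l.foldl (fun acc c => if p c then acc ++ ['A'] else acc ++ [c]) acc
      = acc ++ l.map (fun c => if p c then 'A' else c) := by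
  induction l generalizing acc with
  | nil => simp
  | cons c t ih =>
    by_cases h : p c <;> simp [List.foldl, h, ih, List.append_assoc]

-- lookup in the table built by folding inserts of 'A'
theorem pvTableGet (l : List Char) (d : PySem.Dict Char Char) (c : Char) :
    (l.foldl (fun d c => d.insert c 'A') d).get? c
      = if c ∈ l then some 'A' else d.get? c := by
  induction l generalizing d with
  | nil => simp
  | cons k t ih =>
    simp only [List.foldl, ih, PySem.Dict.get?_insert, List.mem_cons]
    by_cases h1 : c ∈ t <;> by_cases h2 : c = k <;> simp [h1, h2]

-- ===== VERDICT (by name: the statement is the Claim_ definition above) =====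
theorem replace_non_standard_spec : Claim_equal_replace_non_standard := by
  intro s _
  unfold Spec_replace_non_standard replace_non_standard replace_non_standard_alt
  dsimp only []
  rw [pvFoldA (fun c => !((PySem.Set.ofList "ACDEFGHIKLMNPQRSTVWY".toList).contains c))]
  rw [List.nil_append]
  congr 1
  apply List.map_congr_left
  intro c hc
  rw [pvTableGet]
  cases h : (PySem.Set.ofList "ACDEFGHIKLMNPQRSTVWY".toList).contains c with
  | true =>
    have hb : (!(PySem.Set.ofList "ACDEFGHIKLMNPQRSTVWY".toList).contains c) = false := by
      rw [h]; rfl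
    have hnot : c ∉ List.filter (fun c => !(PySem.Set.ofList "ACDEFGHIKLMNPQRSTVWY".toList).contains c) (PySem.Set.ofList s.toList) := by
      intro hmem
      have := (List.mem_filter.mp hmem).2
      rw [hb] at this
      exact Bool.false_ne_true this
    rw [if_neg (by decide), if_neg hnot]
    rfl
  | false =>
    have hb : (!(PySem.Set.ofList "ACDEFGHIKLMNPQRSTVWY".toList).contains c) = true := by
      rw [h]; rfl
    have hmem : c ∈ List.filter (fun c => !(PySem.Set.ofList "ACDEFGHIKLMNPQRSTVWY".toList).contains c) (PySem.Set.ofList s.toList) :=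
      List.mem_filter.mpr ⟨(PySem.Set.mem_ofList _ _).mpr hc, hb⟩
    rw [if_pos (by decide), if_pos hmem]
    rfl
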